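-- pv_equiv track=rewrite | github.com/ZexuSun/AgentSkiller | agentskiller/steps/s08_tool_graph_generation.py | validate_trajectory_preconditions
-- ===== SOURCE A (Python) =====
-- from typing import Dict, List, Any, Set
--
-- def validate_trajectory_preconditions(
--     trajectory: List[str],
--     tool_preconditions: Dict[str, List[str]]
-- ) -> bool:
--     """
--     Validate that a trajectory satisfies all tool preconditions.
--
--     For each tool in the trajectory, check that all its required predecessor tools
--     have been executed before it in the trajectory.
--     """
--     seen_tools: Set[str] = set()
--
--     for tool in trajectory:
--         required = set(tool_preconditions.get(tool, []))
--         if not required.issubset(seen_tools):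
--             return False
--         seen_tools.add(tool)
--
--     return True
-- ===== SOURCE B (Python) =====
-- from typing import Dict, List
--
-- def validate_trajectory_preconditions(
--     trajectory: List[str],
--     tool_preconditions: Dict[str, List[str]]
-- ) -> bool:
--     """Position-table formulation: a precondition p of the tool at position i
--     is satisfied iff p's first occurrence in the trajectory is strictly before i."""
--     first_index = {}
--     for i, tool in enumerate(trajectory):
--         if tool not in first_index:
--             first_index[tool] = i
--     n = len(trajectory)
--     for i, tool in enumerate(trajectory):
--         for p in tool_preconditions.get(tool, []):
--             if first_index.get(p, n) >= i:
--                 return False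
--     return True
-- ===== Notes on version B (the rewrite author's own statement) =====
-- stated objective: alternative
-- what changed: Replaces the growing seen-set (set built, subset-tested and extended at each step) with a first-occurrence position table computed in one preliminary pass, turning each precondition check into a single index comparison first_index[p] < i.
import Mathlib
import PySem

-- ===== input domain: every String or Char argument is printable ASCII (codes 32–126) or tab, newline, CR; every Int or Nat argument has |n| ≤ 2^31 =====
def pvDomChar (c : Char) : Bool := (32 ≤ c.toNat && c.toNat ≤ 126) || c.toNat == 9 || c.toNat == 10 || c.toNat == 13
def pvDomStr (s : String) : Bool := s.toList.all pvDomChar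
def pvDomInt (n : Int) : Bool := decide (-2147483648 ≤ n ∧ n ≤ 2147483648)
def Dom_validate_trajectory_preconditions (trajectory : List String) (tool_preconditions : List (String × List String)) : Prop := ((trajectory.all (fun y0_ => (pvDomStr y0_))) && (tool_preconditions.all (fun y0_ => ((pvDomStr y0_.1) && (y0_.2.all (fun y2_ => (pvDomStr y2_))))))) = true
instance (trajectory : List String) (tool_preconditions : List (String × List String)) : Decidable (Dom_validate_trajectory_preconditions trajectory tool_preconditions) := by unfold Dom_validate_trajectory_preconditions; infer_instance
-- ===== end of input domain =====

-- B replaces A's growing seen-set with a precomputed first-occurrence index table and a position comparison (alternative decomposition, same cost).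


-- ===== PORT A =====
-- the 'for tool in trajectory' loop with early return False
def pvA_loop (tp : List (String × List String)) : List String → PySem.Set String → Bool
  | [], _ => true
  | tool :: rest, seen =>
    let required : PySem.Set String := PySem.Set.ofList ((PySem.Dict.mk tp).getD tool [])
    if PySem.Set.issubset required seen then pvA_loop tp rest (PySem.Set.add seen tool)
    else false

def validate_trajectory_preconditions (trajectory : List String) (tool_preconditions : List (String × List String)) : Bool :=
  pvA_loop tool_preconditions trajectory PySem.Set.empty

-- ===== PORT B =====
-- first pass: record each tool's earliest index
def pvB_firstIndex : List String → Nat → PySem.Dict String Nat → PySem.Dict String Nat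
  | [], _, fi => fi
  | tool :: rest, i, fi =>
      pvB_firstIndex rest (i + 1) (if fi.contains tool then fi else fi.insert tool i)

-- second pass: 'for i, tool in enumerate(trajectory)' with early return False
def pvB_check (fi : PySem.Dict String Nat) (n : Nat) (tp : List (String × List String)) : List String → Nat → Bool
  | [], _ => true
  | tool :: rest, i =>
    if ((PySem.Dict.mk tp).getD tool []).any (fun p => decide (i ≤ fi.getD p n)) then false
    else pvB_check fi n tp rest (i + 1)

def validate_trajectory_preconditions_alt (trajectory : List String) (tool_preconditions : List (String × List String)) : Bool :=
  let fi := pvB_firstIndex trajectory 0 PySem.Dict.empty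
  pvB_check fi trajectory.length tool_preconditions trajectory 0

-- ===== PRECONDITION & SPEC =====
def Spec_validate_trajectory_preconditions (trajectory : List String) (tool_preconditions : List (String × List String)) (out : Bool) : Prop := out = validate_trajectory_preconditions_alt trajectory tool_preconditions
instance (trajectory : List String) (tool_preconditions : List (String × List String)) (out : Bool) : Decidable (Spec_validate_trajectory_preconditions trajectory tool_preconditions out) := by unfold Spec_validate_trajectory_preconditions; infer_instance

-- ===== CLAIM (what is proved, stated in full; the proofs are below) =====
def Claim_equal_validate_trajectory_preconditions : Prop := ∀ (trajectory : List String) (tool_preconditions : List (String × List String)), Dom_validate_trajectory_preconditions trajectory tool_preconditions → Spec_validate_trajectory_preconditions trajectory tool_preconditions (validate_trajectory_preconditions trajectory tool_preconditions)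

-- ===== LEMMAS AND PROOFS =====

-- once a key is in the table its value never changes
theorem pv_fi_getD_of_contains (l : List String) (i0 : Nat) (d : PySem.Dict String Nat)
    (p : String) (n : Nat) (h : d.contains p = true) :
    (pvB_firstIndex l i0 d).getD p n = d.getD p n := by
  induction l generalizing i0 d with
  | nil => rfl
  | cons t rest ih =>
    simp only [pvB_firstIndex]
    cases ht : d.contains t with
    | true => rw [if_pos rfl]; exact ih _ _ h
    | false =>
      rw [if_neg (by simp)]
      by_cases hpt : p = t
      · subst hpt; rw [h] at ht; cases ht
      · rw [ih (i0 + 1) (d.insert t i0) (by simp [PySem.Dict.contains_insert, h]),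
          PySem.Dict.getD_insert, if_neg hpt]

theorem pv_fi_contains (l : List String) (i0 : Nat) (d : PySem.Dict String Nat) (q : String) :
    (pvB_firstIndex l i0 d).contains q = (d.contains q || decide (q ∈ l)) := by
  induction l generalizing i0 d with
  | nil => simp [pvB_firstIndex]
  | cons t rest ih =>
    simp only [pvB_firstIndex]
    cases ht : d.contains t with
    | true =>
      rw [if_pos rfl, ih]
      by_cases hq : q = t
      · subst hq; simp [ht]
      · simp [hq]
    | false =>
      rw [if_neg (by simp), ih]
      by_cases hq : q = t
      · subst hq; rw [PySem.Dict.contains_insert]; simp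
      · have hbe : (q == t) = false := beq_eq_false_iff_ne.mpr hq
        simp [PySem.Dict.contains_insert, hbe, hq]

-- any entry looked up with default n is ≥ m, given the invariant on d
theorem pv_fi_lower (l : List String) (i0 : Nat) (d : PySem.Dict String Nat)
    (p : String) (n m : Nat)
    (hd : d.contains p = true → m ≤ d.getD p n) (hi : m ≤ i0) (hn : m ≤ n) :
    m ≤ (pvB_firstIndex l i0 d).getD p n := by
  induction l generalizing i0 d with
  | nil =>
    simp only [pvB_firstIndex]
    cases h : d.contains p with
    | true => exact hd h
    | false => rw [PySem.Dict.getD_of_not_contains _ _ h]; exact hn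
  | cons t rest ih =>
    simp only [pvB_firstIndex]
    cases ht : d.contains t with
    | true =>
      rw [if_pos rfl]
      exact ih _ _ hd (le_trans hi (Nat.le_succ i0))
    | false =>
      rw [if_neg (by simp)]
      refine ih _ _ ?_ (le_trans hi (Nat.le_succ i0))
      intro hc
      rw [PySem.Dict.getD_insert]
      by_cases hpt : p = t
      · simp [hpt, hi]
      · rw [if_neg hpt]
        exact hd (by simpa [PySem.Dict.contains_insert, hpt] using hc)

-- membership in the scanned list bounds the recorded first index
theorem pv_fi_upper (l : List String) (i0 : Nat) (d : PySem.Dict String Nat)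
    (p : String) (n : Nat)
    (hd : ∀ q, d.contains q = true → d.getD q n < i0) (hp : p ∈ l) :
    (pvB_firstIndex l i0 d).getD p n < i0 + l.length := by
  induction l generalizing i0 d with
  | nil => cases hp
  | cons t rest ih =>
    simp only [pvB_firstIndex]
    have hd' : ∀ q, (if d.contains t = true then d else d.insert t i0).contains q = true →
        (if d.contains t = true then d else d.insert t i0).getD q n < i0 + 1 := by
      intro q hq
      cases ht : d.contains t with
      | true =>
        rw [if_pos ht] at hq
        rw [if_pos rfl]
        exact lt_trans (hd q hq) (Nat.lt_succ_self i0)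
      | false =>
        rw [if_neg (by simp [ht])] at hq
        rw [if_neg (by simp), PySem.Dict.getD_insert]
        by_cases hqt : q = t
        · simp [hqt]
        · rw [if_neg hqt]
          exact lt_trans (hd q (by simpa [PySem.Dict.contains_insert, hqt] using hq))
            (Nat.lt_succ_self i0)
    by_cases hpt : p = t
    · subst hpt
      have hc : (if d.contains p = true then d else d.insert p i0).contains p = true := by
        cases ht : d.contains p with
        | true => rw [if_pos rfl]; exact ht
        | false => rw [if_neg (by simp)]; rw [PySem.Dict.contains_insert]; simp
      rw [pv_fi_getD_of_contains _ _ _ _ _ hc]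
      have := hd' p hc
      simp only [List.length_cons]
      omega
    · have hp' : p ∈ rest := by
        cases hp with
        | head => exact absurd rfl hpt
        | tail _ h => exact h
      have := ih (i0 + 1) _ hd' hp'
      simp only [List.length_cons]
      omega

theorem pv_fi_append (xs ys : List String) (i0 : Nat) (d : PySem.Dict String Nat) :
    pvB_firstIndex (xs ++ ys) i0 d = pvB_firstIndex ys (i0 + xs.length) (pvB_firstIndex xs i0 d) := by
  induction xs generalizing i0 d with
  | nil => simp [pvB_firstIndex]
  | cons t rest ih =>
    simp only [List.cons_append, pvB_firstIndex, ih, List.length_cons]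
    ring_nf

-- the key connection: first_index.get(p, n) < |pre| iff p occurs in pre
theorem pv_key (pre rest : List String) (p : String) :
    ((pvB_firstIndex (pre ++ rest) 0 PySem.Dict.empty).getD p (pre ++ rest).length < pre.length)
      ↔ p ∈ pre := by
  rw [pv_fi_append]
  constructor
  · intro h
    by_contra hp
    have hc : (pvB_firstIndex pre 0 PySem.Dict.empty).contains p = true → False := by
      rw [pv_fi_contains]; simp [hp]
    have := pv_fi_lower rest (0 + pre.length) (pvB_firstIndex pre 0 PySem.Dict.empty)
      p (pre ++ rest).length pre.length (fun hcc => absurd hcc (fun h' => hc h'))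
      (by omega) (by simp)
    omega
  · intro hp
    have hc : (pvB_firstIndex pre 0 PySem.Dict.empty).contains p = true := by
      rw [pv_fi_contains]; simp [hp]
    rw [pv_fi_getD_of_contains _ _ _ _ _ hc]
    have := pv_fi_upper pre 0 PySem.Dict.empty p (pre ++ rest).length
      (by intro q hq; rw [PySem.Dict.contains_empty] at hq; cases hq) hp
    omega

-- main loop invariant: A's seen set holds exactly the tools of the processed prefix
theorem pv_main (tp : List (String × List String)) (rest pre : List String)
    (seen : PySem.Set String) (hseen : ∀ p, p ∈ seen ↔ p ∈ pre) :
    pvA_loop tp rest seen =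
      pvB_check (pvB_firstIndex (pre ++ rest) 0 PySem.Dict.empty) (pre ++ rest).length
        tp rest pre.length := by
  induction rest generalizing pre seen with
  | nil => rfl
  | cons tool rest' ih =>
    simp only [pvA_loop, pvB_check]
    set req := (PySem.Dict.mk tp).getD tool [] with hreq
    have hcond : PySem.Set.issubset (PySem.Set.ofList req) seen =
        !(req.any (fun p => decide (pre.length ≤ (pvB_firstIndex (pre ++ tool :: rest') 0
          PySem.Dict.empty).getD p (pre ++ tool :: rest').length))) := by
      by_cases hall : ∀ p ∈ req, p ∈ pre
      · have h1 : PySem.Set.issubset (PySem.Set.ofList req) seen = true := by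
          rw [PySem.Set.issubset_iff]
          intro x hx
          exact (hseen x).2 (hall x ((PySem.Set.mem_ofList _ _).1 hx))
        have h2 : req.any (fun p => decide (pre.length ≤ (pvB_firstIndex (pre ++ tool :: rest') 0
            PySem.Dict.empty).getD p (pre ++ tool :: rest').length)) = false := by
          simp only [List.any_eq_false, decide_eq_true_eq]
          intro p hp
          have := (pv_key pre (tool :: rest') p).2 (hall p hp)
          omega
        rw [h1, h2]; rfl
      · rw [not_forall] at hall
        obtain ⟨p, hpm⟩ := hall
        rw [Classical.not_imp] at hpm
        obtain ⟨hp, hpp⟩ := hpm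
        have h1 : PySem.Set.issubset (PySem.Set.ofList req) seen = false := by
          cases hb : PySem.Set.issubset (PySem.Set.ofList req) seen with
          | false => rfl
          | true =>
            have := (PySem.Set.issubset_iff _ _).1 hb p ((PySem.Set.mem_ofList _ _).2 hp)
            exact absurd ((hseen p).1 this) hpp
        have h2 : req.any (fun p => decide (pre.length ≤ (pvB_firstIndex (pre ++ tool :: rest') 0
            PySem.Dict.empty).getD p (pre ++ tool :: rest').length)) = true := by
          simp only [List.any_eq_true, decide_eq_true_eq]
          refine ⟨p, hp, ?_⟩
          have := (pv_key pre (tool :: rest') p).not.2 hpp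
          omega
        rw [h1, h2]; rfl
    rw [hcond]
    cases hb : req.any (fun p => decide (pre.length ≤ (pvB_firstIndex (pre ++ tool :: rest') 0
        PySem.Dict.empty).getD p (pre ++ tool :: rest').length)) with
    | true => simp
    | false =>
      simp only [Bool.not_false, if_true]
      have hstep : pre ++ tool :: rest' = (pre ++ [tool]) ++ rest' := by simp
      have hlen : pre.length + 1 = (pre ++ [tool]).length := by simp
      rw [hstep, hlen]
      refine ih (pre ++ [tool]) (PySem.Set.add seen tool) ?_
      intro q
      rw [PySem.Set.mem_add]
      simp [hseen q, or_comm]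

-- ===== VERDICT (by name: the statement is the Claim_ definition above) =====
theorem validate_trajectory_preconditions_spec : Claim_equal_validate_trajectory_preconditions := by
  intro trajectory tool_preconditions _
  unfold Spec_validate_trajectory_preconditions validate_trajectory_preconditions
    validate_trajectory_preconditions_alt
  simpa using pv_main tool_preconditions trajectory [] PySem.Set.empty (by simp [PySem.Set.empty])
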